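-- pv_equiv track=rewrite | github.com/miliar/Code_Jam_Webscraper | Solutions_python/Problem_138/1813.py | RegWar
-- ===== SOURCE A (Python) =====
-- def RegWar(L):
-- 	extra = 0
-- 	KWins = 0
-- 	for i in range(0,len(L)):
-- 		if L[i]==0:
-- 			if extra > 0:
-- 				KWins = KWins + 1
-- 				extra = extra -1
-- 		else:
-- 			extra = extra + 1
-- 	return(KWins)
-- ===== SOURCE B (Python) =====
-- def RegWar(L):
--     b = 0
--     m = 0
--     z = 0
--     for x in L:
--         if x == 0:
--             b -= 1
--             z += 1
--         else:
--             b += 1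
--         m = min(m, b)
--     return z - max(0, -m)
-- ===== Notes on version B (the rewrite author's own statement) =====
-- stated objective: alternative
-- what changed: Replaces the greedy clamped-supply counter with inner conditional win increments by an unconditional prefix-balance scan (running minimum m and zero count z) and the closed-form result z - max(0, -m).
import Mathlib
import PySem

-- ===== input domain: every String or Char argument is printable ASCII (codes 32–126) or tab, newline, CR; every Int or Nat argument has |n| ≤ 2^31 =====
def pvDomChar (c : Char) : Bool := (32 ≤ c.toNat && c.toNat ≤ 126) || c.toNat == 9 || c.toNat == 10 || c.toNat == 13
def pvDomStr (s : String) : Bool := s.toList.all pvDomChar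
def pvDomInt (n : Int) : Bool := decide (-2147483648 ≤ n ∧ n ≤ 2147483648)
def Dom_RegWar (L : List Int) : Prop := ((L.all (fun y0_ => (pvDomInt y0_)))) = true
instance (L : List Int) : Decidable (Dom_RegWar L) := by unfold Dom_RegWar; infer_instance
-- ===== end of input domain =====

-- B replaces A's greedy clamped-supply loop by an unconditional prefix-balance scan
-- (running minimum + zero count) and a closed-form result; objective: alternative.

-- ===== PORT A =====
-- loop body of A: state (extra, KWins), element x = L[i]
def stepA (st : Int × Int) (x : Int) : Int × Int :=
  if x = 0 then (if st.1 > 0 then (st.1 - 1, st.2 + 1) else st) else (st.1 + 1, st.2)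

def RegWar (L : List Int) : Int :=
  -- for i in range(0, len(L)): ... L[i] ...   (index always in range)
  ((PySem.List.pyRange 0 (L.length : Int) 1).foldl
    (fun st i => stepA st (PySem.List.pyGetD L i 0)) (0, 0)).2

-- ===== PORT B =====
-- loop body of B: state (b, m, z) = (raw balance, running minimum, zero count)
def stepB (st : Int × Int × Int) (x : Int) : Int × Int × Int :=
  let b := if x = 0 then st.1 - 1 else st.1 + 1
  (b, min st.2.1 b, st.2.2 + if x = 0 then 1 else 0)

def RegWar_alt (L : List Int) : Int :=
  let s := L.foldl stepB (0, 0, 0)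
  s.2.2 - max 0 (-s.2.1)

-- ===== PRECONDITION & SPEC =====
def Spec_RegWar (L : List Int) (out : Int) : Prop := out = RegWar_alt L
instance (L : List Int) (out : Int) : Decidable (Spec_RegWar L out) := by unfold Spec_RegWar; infer_instance

-- ===== CLAIM (what is proved, stated in full; the proofs are below) =====
def Claim_equal_RegWar : Prop := ∀ (L : List Int), Dom_RegWar L → Spec_RegWar L (RegWar L)

-- ===== LEMMAS AND PROOFS =====

-- invariant: A's state is (b - m, z + m) when B's state is (b, m, z), with m ≤ 0 and m ≤ b
lemma war_inv (L : List Int) (b m z : Int) (hm0 : m ≤ 0) (hmb : m ≤ b) :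
    L.foldl stepA (b - m, z + m) =
      ((L.foldl stepB (b, m, z)).1 - (L.foldl stepB (b, m, z)).2.1,
       (L.foldl stepB (b, m, z)).2.2 + (L.foldl stepB (b, m, z)).2.1) ∧
    (L.foldl stepB (b, m, z)).2.1 ≤ 0 := by
  induction L generalizing b m z with
  | nil => simpa using hm0
  | cons x t ih =>
    simp only [List.foldl_cons]
    by_cases hx : x = 0
    · by_cases h : (0 : Int) < b - m
      · have e1 : stepA (b - m, z + m) x = ((b - 1) - m, (z + 1) + m) := by
          simp only [stepA, hx, if_true, if_pos h, Prod.mk.injEq]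
          exact ⟨by ring, by ring⟩
        have e2 : stepB (b, m, z) x = (b - 1, m, z + 1) := by
          simp only [stepB, hx]
          have : min m (b - 1) = m := min_eq_left (by omega)
          simp [this]
        rw [e1, e2]
        exact ih (b - 1) m (z + 1) hm0 (by omega)
      · have hbm : b = m := by omega
        have e1 : stepA (b - m, z + m) x = ((b - 1) - (b - 1), (z + 1) + (b - 1)) := by
          simp only [stepA, hx, if_true, if_neg h, Prod.mk.injEq]
          exact ⟨by omega, by omega⟩
        have e2 : stepB (b, m, z) x = (b - 1, b - 1, z + 1) := by
          simp only [stepB, hx]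
          have : min m (b - 1) = b - 1 := min_eq_right (by omega)
          simp [this]
        rw [e1, e2]
        exact ih (b - 1) (b - 1) (z + 1) (by omega) le_rfl
    · have e1 : stepA (b - m, z + m) x = ((b + 1) - m, z + m) := by
        simp [stepA, hx]
        ring
      have e2 : stepB (b, m, z) x = (b + 1, m, z) := by
        simp only [stepB, if_neg hx]
        have : min m (b + 1) = m := min_eq_left (by omega)
        simp [this]
      rw [e1, e2]
      exact ih (b + 1) m z hm0 (by omega)

-- ===== VERDICT (by name: the statement is the Claim_ definition above) =====
theorem RegWar_spec : Claim_equal_RegWar := by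
  intro L _
  unfold Spec_RegWar RegWar RegWar_alt
  rw [PySem.List.foldl_pyRange_zero_pyGetD' L 0 stepA (0, 0)]
  obtain ⟨h1, h2⟩ := war_inv L 0 0 0 le_rfl le_rfl
  norm_num at h1
  rw [h1]
  simp only
  omega
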